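-- pv_equiv track=rewrite | github.com/essodjolo/timeCalculator | time_calculator.py | format_output_time
-- ===== SOURCE A (Python) =====
-- days_of_week = ["monday", "tuesday", "wednesday", "thursday", "friday", "saturday", "sunday"]
--
-- def get_following_day(day_of_week: str) -> str:
--     match day_of_week:
--         case "monday":
--             return "tuesday"
--         case "tuesday":
--             return "wednesday"
--         case "wednesday":
--             return "thursday"
--         case "thursday":
--             return "friday"
--         case "friday":
--             return "saturday"
--         case "saturday":
--             return "sunday"
--         case "sunday":
--             return "monday"
--
-- def format_output_time(time: str, number_of_days: int, starting_day_of_the_week: str) -> str: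
--     new_day = starting_day_of_the_week
--
--     # To get the new day, we divide the number of days by 7 and use the remainder to find the new day.
--     # Example: if number of days = 10, we will only go to the third following day to get the new day.
--     for i in range(number_of_days % 7):
--         new_day = get_following_day(new_day)
--
--     # Return output following the pattern given in the exercise
--     output = time
--
--     if starting_day_of_the_week in days_of_week:
--         output += ", " + new_day.title()
--
--     if number_of_days == 1:
--         output += " (next day)"
--     elif number_of_days > 1:
--         output += " (" + str(number_of_days) + " days later)"
--
--     return output
-- ===== SOURCE B (Python) =====
-- days_of_week = ["monday", "tuesday", "wednesday", "thursday", "friday", "saturday", "sunday"]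
--
-- def format_output_time(time: str, number_of_days: int, starting_day_of_the_week: str) -> str:
--     output = time
--
--     # Closed-form weekday: index arithmetic modulo 7 instead of stepping day by day.
--     if starting_day_of_the_week in days_of_week:
--         idx = days_of_week.index(starting_day_of_the_week)
--         output += ", " + days_of_week[(idx + number_of_days) % 7].title()
--
--     if number_of_days == 1:
--         output += " (next day)"
--     elif number_of_days > 1:
--         output += " (" + str(number_of_days) + " days later)"
--
--     return output
-- ===== Notes on version B (the rewrite author's own statement) =====
-- stated objective: simpler
-- what changed: The day-stepping loop over get_following_day (a 7-case match applied n%7 times) is replaced by a closed-form index computation: days_of_week[(index(start) + number_of_days) % 7], guarded by the same membership test.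
import Mathlib
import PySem

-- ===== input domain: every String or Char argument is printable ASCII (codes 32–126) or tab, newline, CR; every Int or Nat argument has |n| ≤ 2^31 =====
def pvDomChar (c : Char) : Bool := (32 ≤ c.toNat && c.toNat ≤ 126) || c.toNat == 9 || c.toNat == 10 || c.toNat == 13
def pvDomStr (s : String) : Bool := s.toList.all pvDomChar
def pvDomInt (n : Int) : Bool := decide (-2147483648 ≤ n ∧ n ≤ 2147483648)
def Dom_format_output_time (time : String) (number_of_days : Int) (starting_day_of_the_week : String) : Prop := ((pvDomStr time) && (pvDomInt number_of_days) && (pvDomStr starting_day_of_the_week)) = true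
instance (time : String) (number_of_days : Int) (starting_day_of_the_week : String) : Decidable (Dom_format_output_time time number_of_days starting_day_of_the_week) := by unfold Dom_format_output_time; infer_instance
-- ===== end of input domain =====

-- B replaces A's day-stepping loop by closed-form index arithmetic modulo 7 (simpler); proved equal on all inputs.

-- Python's str.title(), exact on ASCII: a letter is uppercased after a non-letter, lowercased after a letter.
def pyTitleChars : List Char → Bool → List Char
  | [], _ => []
  | c :: cs, prevAlpha =>
    (if PySem.Chars.isalpha c then (if prevAlpha then PySem.Chars.lowerChar c else PySem.Chars.upperChar c) else c)
      :: pyTitleChars cs (PySem.Chars.isalpha c)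

def pyTitle (s : String) : String := String.ofList (pyTitleChars s.toList false)

-- ===== PORT A =====
def daysOfWeek : List String :=
  ["monday", "tuesday", "wednesday", "thursday", "friday", "saturday", "sunday"]

-- A's match statement falls through for an unknown day, i.e. Python returns None: modelled by Option.
def getFollowingDay (d : String) : Option String :=
  if d = "monday" then some "tuesday"
  else if d = "tuesday" then some "wednesday"
  else if d = "wednesday" then some "thursday"
  else if d = "thursday" then some "friday"
  else if d = "friday" then some "saturday"
  else if d = "saturday" then some "sunday"
  else if d = "sunday" then some "monday"
  else none

def format_output_time (time : String) (number_of_days : Int) (starting_day_of_the_week : String) : String :=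
  -- new_day may become None (unknown start day); Python's get_following_day(None) is also None.
  let new_day : Option String :=
    (List.range (PySem.Int.mod number_of_days 7).toNat).foldl
      (fun d _ => match d with | some s => getFollowingDay s | none => none)
      (some starting_day_of_the_week)
  let output := time
  let output :=
    if starting_day_of_the_week ∈ daysOfWeek then
      -- inside this branch new_day is always some (start is a known day); Python's new_day.title()
      output ++ ", " ++ pyTitle (match new_day with | some s => s | none => "")
    else output
  if number_of_days = 1 then output ++ " (next day)"
  else if number_of_days > 1 then output ++ " (" ++ PySem.Int.toStr number_of_days ++ " days later)"
  else output

-- ===== PORT B =====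
def format_output_time_alt (time : String) (number_of_days : Int) (starting_day_of_the_week : String) : String :=
  let output := time
  let output :=
    if starting_day_of_the_week ∈ daysOfWeek then
      -- days_of_week.index(start) is some inside the membership guard; (idx+n)%7 is in range 0..6
      let idx := (PySem.List.index? daysOfWeek starting_day_of_the_week).getD 0
      output ++ ", " ++ pyTitle ((PySem.List.pyGet? daysOfWeek (PySem.Int.mod (idx + number_of_days) 7)).getD "")
    else output
  if number_of_days = 1 then output ++ " (next day)"
  else if number_of_days > 1 then output ++ " (" ++ PySem.Int.toStr number_of_days ++ " days later)"
  else output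

-- ===== PRECONDITION & SPEC =====
def Spec_format_output_time (time : String) (number_of_days : Int) (starting_day_of_the_week : String) (out : String) : Prop := out = format_output_time_alt time number_of_days starting_day_of_the_week
instance (time : String) (number_of_days : Int) (starting_day_of_the_week : String) (out : String) : Decidable (Spec_format_output_time time number_of_days starting_day_of_the_week out) := by unfold Spec_format_output_time; infer_instance

-- ===== CLAIM (what is proved, stated in full; the proofs are below) =====
def Claim_equal_format_output_time : Prop := ∀ (time : String) (number_of_days : Int) (starting_day_of_the_week : String), Dom_format_output_time time number_of_days starting_day_of_the_week → Spec_format_output_time time number_of_days starting_day_of_the_week (format_output_time time number_of_days starting_day_of_the_week)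

-- ===== LEMMAS AND PROOFS =====
lemma day_eq (n : Int) (s : String) (hs : s ∈ daysOfWeek) :
    pyTitle (match (List.range (PySem.Int.mod n 7).toNat).foldl
        (fun d _ => match d with | some t => getFollowingDay t | none => none) (some s) with
      | some t => t | none => "")
    = pyTitle ((PySem.List.pyGet? daysOfWeek
        (PySem.Int.mod (((PySem.List.index? daysOfWeek s).getD 0) + n) 7)).getD "") := by
  fin_cases hs <;>
  · rw [PySem.Int.mod_eq_emod_of_pos (a := n) (b := 7) (by norm_num),
      PySem.Int.mod_eq_emod_of_pos (b := 7) (by norm_num),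
      show ∀ idx : Int, (idx + n) % 7 = (idx + n % 7) % 7 from fun _ => by omega]
    rcases (by omega : n % 7 = 0 ∨ n % 7 = 1 ∨ n % 7 = 2 ∨ n % 7 = 3 ∨ n % 7 = 4 ∨ n % 7 = 5 ∨ n % 7 = 6)
      with h | h | h | h | h | h | h <;> rw [h] <;> decide

theorem format_output_time_spec : Claim_equal_format_output_time := by
  intro time n s _
  unfold Spec_format_output_time format_output_time format_output_time_alt
  by_cases h : s ∈ daysOfWeek
  · simp only [if_pos h, day_eq n s h]
  · simp only [if_neg h]
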